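-- pv_equiv track=rewrite | github.com/madnklo/madnklo | madgraph/iolibs/template_files/subtraction/subtraction_schemes/torino/recoiler_function.py | get_virtual_recoiler
-- ===== SOURCE A (Python) =====
-- def get_virtual_recoiler(leg_PDGs_proc_prefix):
--
--     partons_id = [1, -1, 2, -2, 3, -3, 4, -4, 5, -5, 6, -6, 21]
--
--     virtual_recoiler = []
--
--     for i in range(0,len(leg_PDGs_proc_prefix)):
--
--         parent = i
--
--         if leg_PDGs_proc_prefix[parent] not in partons_id:
--             continue
--
--         initial_recoilers = [
--             leg for leg in range(0,len(leg_PDGs_proc_prefix)) if all([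
--                 leg <= 1,
--                 leg_PDGs_proc_prefix[leg] in partons_id,
--                 leg != parent]
--             )
--         ]
--
--         final_recoilers = [
--             leg for leg in range(0,len(leg_PDGs_proc_prefix)) if all([
--                 leg > 1,
--                 leg_PDGs_proc_prefix[leg] in partons_id,
--                 leg != parent]
--             )
--         ]
--
--         if len(initial_recoilers) > 0:
--             ref = initial_recoilers[0]
--         else:
--             final_recoilers.sort(key = lambda l: leg_PDGs_proc_prefix[l])
--             ref = final_recoilers[0]
--
--         virtual_recoiler.append((parent+1,ref+1))
--
--     return virtual_recoiler
-- ===== SOURCE B (Python) =====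
-- def get_virtual_recoiler(leg_PDGs_proc_prefix):
--
--     partons_id = [1, -1, 2, -2, 3, -3, 4, -4, 5, -5, 6, -6, 21]
--
--     n = len(leg_PDGs_proc_prefix)
--
--     # precomputed once: initial-state parton legs, and final-state parton legs
--     # sorted (stably) by their PDG id
--     initials = [l for l in (0, 1) if l < n and leg_PDGs_proc_prefix[l] in partons_id]
--     finals = sorted((l for l in range(2, n) if leg_PDGs_proc_prefix[l] in partons_id),
--                     key=lambda l: leg_PDGs_proc_prefix[l])
--
--     virtual_recoiler = []
--     for parent in range(n):
--         if leg_PDGs_proc_prefix[parent] not in partons_id: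
--             continue
--         ref = next((l for l in initials if l != parent), None)
--         if ref is None:
--             ref = next(l for l in finals if l != parent)
--         virtual_recoiler.append((parent + 1, ref + 1))
--     return virtual_recoiler
-- ===== Notes on version B (the rewrite author's own statement) =====
-- stated objective: faster
-- what changed: B precomputes the initial-parton list and one PDG-sorted final-parton list once, then for each parent picks the first non-parent entry by a linear scan, instead of A's per-parent rebuild and re-sort of both recoiler lists.
import Mathlib
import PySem

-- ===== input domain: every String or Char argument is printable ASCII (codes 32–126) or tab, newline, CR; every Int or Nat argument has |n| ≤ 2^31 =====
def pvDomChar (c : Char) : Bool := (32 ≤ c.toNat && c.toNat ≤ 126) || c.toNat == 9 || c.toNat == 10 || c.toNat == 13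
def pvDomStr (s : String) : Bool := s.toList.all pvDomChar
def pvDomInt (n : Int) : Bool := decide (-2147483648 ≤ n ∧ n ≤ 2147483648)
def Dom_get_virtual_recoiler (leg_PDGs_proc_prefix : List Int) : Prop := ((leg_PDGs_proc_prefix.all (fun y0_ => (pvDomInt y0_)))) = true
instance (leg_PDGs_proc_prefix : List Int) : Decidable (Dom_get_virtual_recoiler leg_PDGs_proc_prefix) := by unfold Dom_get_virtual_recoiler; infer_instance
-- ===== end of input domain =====

-- B precomputes the initial-parton list and one PDG-sorted final-parton list once and scans each
-- for the first non-parent entry, instead of A's per-parent rebuild-and-resort (objective: faster).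


-- ===== PORT A =====
-- partons_id, the same literal constant in both Python versions
def pvPartonsId : List Int := [1, -1, 2, -2, 3, -3, 4, -4, 5, -5, 6, -6, 21]

def get_virtual_recoiler (leg_PDGs_proc_prefix : List Int) : List (Int × Int) :=
  let n := PySem.List.len leg_PDGs_proc_prefix
  (PySem.List.pyRange 0 n 1).foldl (fun virtual_recoiler i =>
    let parent := i
    if !(pvPartonsId.contains (PySem.List.pyGetD leg_PDGs_proc_prefix parent 0)) then
      virtual_recoiler
    else
      let initial_recoilers := (PySem.List.pyRange 0 n 1).filter
        (fun leg => (decide (leg ≤ 1) &&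
          pvPartonsId.contains (PySem.List.pyGetD leg_PDGs_proc_prefix leg 0)) && (leg != parent))
      let final_recoilers := (PySem.List.pyRange 0 n 1).filter
        (fun leg => (decide (1 < leg) &&
          pvPartonsId.contains (PySem.List.pyGetD leg_PDGs_proc_prefix leg 0)) && (leg != parent))
      let ref :=
        if 0 < initial_recoilers.length then
          PySem.List.pyGetD initial_recoilers 0 0          -- initial_recoilers[0]
        else
          PySem.List.pyGetD                                 -- final_recoilers.sort(key=…); [0]
            (PySem.List.sorted final_recoilers
              (fun l => PySem.List.pyGetD leg_PDGs_proc_prefix l 0)) 0 0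
      virtual_recoiler ++ [(parent + 1, ref + 1)]) []

-- ===== PORT B =====
def get_virtual_recoiler_alt (leg_PDGs_proc_prefix : List Int) : List (Int × Int) :=
  let n := PySem.List.len leg_PDGs_proc_prefix
  let initials := ([0, 1] : List Int).filter
    (fun l => decide (l < n) && pvPartonsId.contains (PySem.List.pyGetD leg_PDGs_proc_prefix l 0))
  let finals := PySem.List.sorted
    ((PySem.List.pyRange 2 n 1).filter
      (fun l => pvPartonsId.contains (PySem.List.pyGetD leg_PDGs_proc_prefix l 0)))
    (fun l => PySem.List.pyGetD leg_PDGs_proc_prefix l 0)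
  (PySem.List.pyRange 0 n 1).foldl (fun virtual_recoiler parent =>
    if !(pvPartonsId.contains (PySem.List.pyGetD leg_PDGs_proc_prefix parent 0)) then
      virtual_recoiler
    else
      let ref :=
        match initials.find? (fun l => l != parent) with    -- next((l for l in initials …), None)
        | some r => r
        | none => (finals.find? (fun l => l != parent)).getD 0   -- next(l for l in finals …)
      virtual_recoiler ++ [(parent + 1, ref + 1)]) []

-- ===== PRECONDITION & SPEC =====
-- Pre_ excludes exactly the inputs with a single parton leg: there the only parton is its own
-- parent, both recoiler lists are empty, and Python A raises IndexError (B raises StopIteration).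
def Pre_get_virtual_recoiler (leg_PDGs_proc_prefix : List Int) : Prop :=
  leg_PDGs_proc_prefix.countP (fun v => pvPartonsId.contains v) ≠ 1
instance (leg_PDGs_proc_prefix : List Int) : Decidable (Pre_get_virtual_recoiler leg_PDGs_proc_prefix) := by unfold Pre_get_virtual_recoiler; infer_instance
def pvWitness_get_virtual_recoiler : List Int := [21, 2, 25]
def Spec_get_virtual_recoiler (leg_PDGs_proc_prefix : List Int) (out : List (Int × Int)) : Prop := out = get_virtual_recoiler_alt leg_PDGs_proc_prefix
instance (leg_PDGs_proc_prefix : List Int) (out : List (Int × Int)) : Decidable (Spec_get_virtual_recoiler leg_PDGs_proc_prefix out) := by unfold Spec_get_virtual_recoiler; infer_instance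

-- ===== CLAIM (what is proved, stated in full; the proofs are below) =====
def Claim_equal_get_virtual_recoiler : Prop := ∀ (leg_PDGs_proc_prefix : List Int), Dom_get_virtual_recoiler leg_PDGs_proc_prefix → Pre_get_virtual_recoiler leg_PDGs_proc_prefix → Spec_get_virtual_recoiler leg_PDGs_proc_prefix (get_virtual_recoiler leg_PDGs_proc_prefix)

-- ===== LEMMAS AND PROOFS =====

-- inserting before every element puts x in front
theorem pv_insertBy_forall_before (key : Int → Int) (x : Int) (l : List Int)
    (h : ∀ z ∈ l, key x < key z) :
    PySem.List.insertBy (fun a b => decide (key a < key b)) x l = x :: l := by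
  cases l with
  | nil => rfl
  | cons z zs =>
    have hz : key x < key z := h z (by simp)
    simp [PySem.List.insertBy, hz]

-- filtering commutes with one stable insertion into a key-sorted list
theorem pv_filter_insertBy (key : Int → Int) (q : Int → Bool) (x : Int) (ys : List Int)
    (h : ys.Pairwise (fun a b => key a ≤ key b)) :
    (PySem.List.insertBy (fun a b => decide (key a < key b)) x ys).filter q
      = if q x then PySem.List.insertBy (fun a b => decide (key a < key b)) x (ys.filter q)
        else ys.filter q := by
  induction ys with
  | nil => by_cases hx : q x <;> simp [PySem.List.insertBy, hx]
  | cons y ys ih =>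
    rw [List.pairwise_cons] at h
    obtain ⟨hy, hys⟩ := h
    by_cases hb : key x < key y
    · have hins : PySem.List.insertBy (fun a b => decide (key a < key b)) x (y :: ys)
          = x :: y :: ys := by simp [PySem.List.insertBy, hb]
      rw [hins]
      by_cases hqy : q y
      · simp [List.filter_cons, hqy, PySem.List.insertBy, hb]
      · have hall : ∀ z ∈ ys.filter q, key x < key z := by
          intro z hz
          exact lt_of_lt_of_le hb (hy z (List.mem_of_mem_filter hz))
        by_cases hx : q x <;>
          simp [hqy, hx, pv_insertBy_forall_before key x _ hall]
    · have hins : PySem.List.insertBy (fun a b => decide (key a < key b)) x (y :: ys)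
          = y :: PySem.List.insertBy (fun a b => decide (key a < key b)) x ys := by
        simp [PySem.List.insertBy, hb]
      rw [hins]
      by_cases hqy : q y
      · have h2 : PySem.List.insertBy (fun a b => decide (key a < key b)) x (y :: List.filter q ys)
            = y :: PySem.List.insertBy (fun a b => decide (key a < key b)) x (List.filter q ys) := by
          simp [PySem.List.insertBy, hb]
        by_cases hx : q x <;>
          simp [hqy, hx, ih hys, h2]
      · by_cases hx : q x <;> simp [hqy, hx, ih hys]

-- a stable key-sort commutes with filtering
theorem pv_sorted_filter (key : Int → Int) (q : Int → Bool) (xs : List Int) :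
    PySem.List.sorted (xs.filter q) key = (PySem.List.sorted xs key).filter q := by
  induction xs using List.reverseRecOn with
  | nil => rfl
  | append_singleton ys x ih =>
    have hstep : ∀ (l : List Int), PySem.List.sorted (l ++ [x]) key
        = PySem.List.insertBy (fun a b => decide (key a < key b)) x (PySem.List.sorted l key) := by
      intro l
      rw [PySem.List.sorted_eq_foldl_insertBy, PySem.List.sorted_eq_foldl_insertBy,
        List.foldl_append]
      rfl
    rw [hstep, pv_filter_insertBy key q x _ (PySem.List.sorted_pairwise ys key),
      List.filter_append]
    rw [List.filter_cons, List.filter_nil]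
    by_cases hx : q x
    · simp only [hx, if_true]
      rw [hstep, ih]
    · simp only [hx, Bool.false_eq_true, if_false, List.append_nil]
      exact ih

-- the part of range(n) at indices ≤ 1 is [0,1] clipped to < n
theorem pv_range_low (n : Int) (Q : Int → Bool) :
    (PySem.List.pyRange 0 n 1).filter (fun l => decide (l ≤ 1) && Q l)
      = ([0, 1] : List Int).filter (fun l => decide (l < n) && Q l) := by
  by_cases h2 : 2 ≤ n
  · rw [PySem.List.pyRange_one_cons (by omega), PySem.List.pyRange_one_cons (by omega)]
    have htail : (PySem.List.pyRange (0 + 1 + 1) n 1).filter (fun l => decide (l ≤ 1) && Q l)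
        = [] := by
      rw [List.filter_eq_nil_iff]
      intro a ha
      have := PySem.List.mem_pyRange_one.mp ha
      simp only [Bool.and_eq_true, decide_eq_true_eq]
      omega
    simp only [List.filter_cons, htail]
    simp [show (0:Int) < n by omega, show (1:Int) < n by omega]
  · by_cases h1 : n = 1
    · subst h1
      rw [PySem.List.pyRange_one_cons (by omega)]
      have : PySem.List.pyRange (0 + 1) 1 1 = [] := by
        rw [List.eq_nil_iff_forall_not_mem]
        intro a ha
        have := PySem.List.mem_pyRange_one.mp ha
        omega
      rw [this]
      simp [List.filter_cons]
    · have hle : n ≤ 0 := by omega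
      have h0 : PySem.List.pyRange 0 n 1 = [] := by
        rw [List.eq_nil_iff_forall_not_mem]
        intro a ha
        have := PySem.List.mem_pyRange_one.mp ha
        omega
      rw [h0]
      simp [show ¬ ((0:Int) < n) by omega, show ¬ ((1:Int) < n) by omega]

-- the part of range(n) at indices > 1 is range(2, n)
theorem pv_range_high (n : Int) (Q : Int → Bool) :
    (PySem.List.pyRange 0 n 1).filter (fun l => decide (1 < l) && Q l)
      = (PySem.List.pyRange 2 n 1).filter Q := by
  by_cases h2 : 2 ≤ n
  · rw [PySem.List.pyRange_one_cons (by omega), PySem.List.pyRange_one_cons (by omega)]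
    rw [show (0 : Int) + 1 + 1 = 2 by norm_num]
    rw [List.filter_cons, List.filter_cons]
    simp only [show decide ((1:Int) < 0) = false from rfl,
      Bool.false_and, Bool.false_eq_true, if_false]

    exact List.filter_congr (fun a ha => by
      have := PySem.List.mem_pyRange_one.mp ha
      simp only [show decide (1 < a) = true from by simp; omega, Bool.true_and])
  · have h0 : PySem.List.pyRange 0 n 1 = [] ∨
        (PySem.List.pyRange 0 n 1).filter (fun l => decide (1 < l) && Q l) = [] := by
      right
      rw [List.filter_eq_nil_iff]
      intro a ha
      have := PySem.List.mem_pyRange_one.mp ha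
      simp only [Bool.and_eq_true, decide_eq_true_eq]
      omega
    have hr2 : PySem.List.pyRange 2 n 1 = [] := by
      rw [List.eq_nil_iff_forall_not_mem]
      intro a ha
      have := PySem.List.mem_pyRange_one.mp ha
      omega
    rcases h0 with h0 | h0
    · rw [h0, hr2]; rfl
    · rw [h0, hr2]; rfl

-- the per-parent recoiler reference computed by A equals the one computed by B
theorem pv_ref_eq (leg : List Int) (i : Int) :
    (if 0 < ((PySem.List.pyRange 0 (PySem.List.len leg) 1).filter
        (fun l => (decide (l ≤ 1) && pvPartonsId.contains (PySem.List.pyGetD leg l 0)) && (l != i))).length then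
       PySem.List.pyGetD ((PySem.List.pyRange 0 (PySem.List.len leg) 1).filter
        (fun l => (decide (l ≤ 1) && pvPartonsId.contains (PySem.List.pyGetD leg l 0)) && (l != i))) 0 0
     else
       PySem.List.pyGetD
         (PySem.List.sorted ((PySem.List.pyRange 0 (PySem.List.len leg) 1).filter
            (fun l => (decide (1 < l) && pvPartonsId.contains (PySem.List.pyGetD leg l 0)) && (l != i)))
           (fun l => PySem.List.pyGetD leg l 0)) 0 0)
    = (match (([0, 1] : List Int).filter
          (fun l => decide (l < PySem.List.len leg) &&
            pvPartonsId.contains (PySem.List.pyGetD leg l 0))).find? (fun l => l != i) with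
       | some r => r
       | none =>
         ((PySem.List.sorted
             ((PySem.List.pyRange 2 (PySem.List.len leg) 1).filter
               (fun l => pvPartonsId.contains (PySem.List.pyGetD leg l 0)))
             (fun l => PySem.List.pyGetD leg l 0)).find? (fun l => l != i)).getD 0) := by
  have hinit : (PySem.List.pyRange 0 (PySem.List.len leg) 1).filter
      (fun l => (decide (l ≤ 1) && pvPartonsId.contains (PySem.List.pyGetD leg l 0)) && (l != i))
      = (([0, 1] : List Int).filter
          (fun l => decide (l < PySem.List.len leg) &&
            pvPartonsId.contains (PySem.List.pyGetD leg l 0))).filter (fun l => l != i) := by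
    rw [List.filter_congr (fun a _ => Bool.and_assoc ..),
      pv_range_low (PySem.List.len leg)
        (fun l => pvPartonsId.contains (PySem.List.pyGetD leg l 0) && (l != i)),
      List.filter_filter]
    exact List.filter_congr (fun a _ => by
      cases decide (a < PySem.List.len leg) <;>
        cases pvPartonsId.contains (PySem.List.pyGetD leg a 0) <;> cases a != i <;> rfl)
  have hfin : (PySem.List.pyRange 0 (PySem.List.len leg) 1).filter
      (fun l => (decide (1 < l) && pvPartonsId.contains (PySem.List.pyGetD leg l 0)) && (l != i))
      = ((PySem.List.pyRange 2 (PySem.List.len leg) 1).filter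
          (fun l => pvPartonsId.contains (PySem.List.pyGetD leg l 0))).filter (fun l => l != i) := by
    rw [List.filter_congr (fun a _ => Bool.and_assoc ..),
      pv_range_high (PySem.List.len leg)
        (fun l => pvPartonsId.contains (PySem.List.pyGetD leg l 0) && (l != i)),
      List.filter_filter]
    exact List.filter_congr (fun a _ => by
      cases pvPartonsId.contains (PySem.List.pyGetD leg a 0) <;> cases a != i <;> rfl)
  rw [hinit, hfin, pv_sorted_filter]
  set S := ([0, 1] : List Int).filter
    (fun l => decide (l < PySem.List.len leg) &&
      pvPartonsId.contains (PySem.List.pyGetD leg l 0)) with hS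
  set F := PySem.List.sorted
    ((PySem.List.pyRange 2 (PySem.List.len leg) 1).filter
      (fun l => pvPartonsId.contains (PySem.List.pyGetD leg l 0)))
    (fun l => PySem.List.pyGetD leg l 0) with hF
  have hfind : (S.filter (fun l => l != i)).head? = S.find? (fun l => l != i) :=
    List.head?_filter
  cases hf : S.find? (fun l => l != i) with
  | none =>
    rw [hf] at hfind
    have hnil : S.filter (fun l => l != i) = [] := List.head?_eq_none_iff.mp hfind
    rw [hnil]
    simp only [List.length_nil, lt_irrefl, if_false]
    rw [PySem.List.pyGetD_zero, List.getD_eq_getElem?_getD, ← List.head?_eq_getElem?,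
      List.head?_filter]
  | some r =>
    rw [hf] at hfind
    cases hl : S.filter (fun l => l != i) with
    | nil => rw [hl] at hfind; simp at hfind
    | cons a t =>
      rw [hl] at hfind
      simp only [List.head?_cons, Option.some.injEq] at hfind
      simp only [List.length_cons, PySem.List.pyGetD_zero_cons, hfind,
        Nat.zero_lt_succ, if_true]

theorem get_virtual_recoiler_spec : Claim_equal_get_virtual_recoiler := by
  intro leg _ _
  unfold Spec_get_virtual_recoiler get_virtual_recoiler get_virtual_recoiler_alt
  simp only []
  refine PySem.List.foldl_congr_mem _ _ _ _ ?_
  intro acc x hx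
  by_cases hc : pvPartonsId.contains (PySem.List.pyGetD leg x 0)
  · simp only [hc, Bool.not_true, Bool.false_eq_true, if_false]
    rw [pv_ref_eq leg x]
  · simp only [hc, Bool.not_false, if_true]
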